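-- pv_equiv track=rewrite | github.com/adarshnamsani/exam | python-test1.py | get_sorted_diff_string
-- ===== SOURCE A (Python) =====
-- import collections
--
-- def get_sorted_diff_string(first, second):
--     """
--     returns a string which contains letters in first but not in second.
--     e.g.s apple and pig returns ael.
--     """
--     xy=""
--     if(first== second):
--         return xy
--     elif(len(first)==0 and len(second)!=0):
--         b = "".join(collections.OrderedDict.fromkeys(second))
--         d=''.join(sorted(b))
--         return d
--     elif (len(first) != 0 and len(second) == 0):
--         b = "".join(collections.OrderedDict.fromkeys(first))
--         d=''.join(sorted(b))
--         return d
--     else: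
--         k=0
--         c=[]
--         flag=0
--         for i in range(0,len(first)):
--             for j in range(0,len(second)):
--                 if(first[i]!=second[j]):
--                     flag=1
--                 else:
--                     flag=0
--                     break
--             if(flag==1):
--             #c[k]=first[i]
--             #k=k+1
--                 c.append(first[i])
--     d=''.join(sorted(c))
--     return d
-- ===== SOURCE B (Python) =====
-- import collections
--
-- def get_sorted_diff_string(first, second):
--     """
--     returns a string which contains letters in first but not in second.
--     e.g.s apple and pig returns ael.
--     """
--     if first == second:
--         return ""
--     if len(first) == 0 and len(second) != 0:
--         return ''.join(sorted(collections.OrderedDict.fromkeys(second)))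
--     if len(first) != 0 and len(second) == 0:
--         return ''.join(sorted(collections.OrderedDict.fromkeys(first)))
--     sf = sorted(first)
--     ss = sorted(second)
--     out = []
--     i = 0
--     j = 0
--     while i < len(sf):
--         ch = sf[i]
--         run_end = i
--         while run_end < len(sf) and sf[run_end] == ch:
--             run_end += 1
--         while j < len(ss) and ss[j] < ch:
--             j += 1
--         if j >= len(ss) or ss[j] != ch:
--             out.extend(sf[i:run_end])
--         i = run_end
--     return ''.join(out)
-- ===== Notes on version B (the rewrite author's own statement) =====
-- stated objective: faster
-- what changed: The general branch's O(len(first)*len(second)) nested membership scan followed by a sort is replaced by sorting both strings once and doing a single run-wise two-pointer merge over sorted(first) against sorted(second), emitting each run whose character is absent; the output is produced already sorted.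
import Mathlib
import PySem

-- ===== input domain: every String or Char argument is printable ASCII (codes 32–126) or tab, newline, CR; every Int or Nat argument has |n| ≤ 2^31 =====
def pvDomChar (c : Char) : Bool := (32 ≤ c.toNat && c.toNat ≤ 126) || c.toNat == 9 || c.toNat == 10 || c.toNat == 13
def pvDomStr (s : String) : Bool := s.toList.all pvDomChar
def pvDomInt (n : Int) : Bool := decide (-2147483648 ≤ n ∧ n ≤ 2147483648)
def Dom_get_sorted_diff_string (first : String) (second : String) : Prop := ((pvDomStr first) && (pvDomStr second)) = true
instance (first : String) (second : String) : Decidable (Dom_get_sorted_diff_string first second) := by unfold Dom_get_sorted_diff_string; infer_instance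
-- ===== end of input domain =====

-- B replaces A's nested membership scan by sorting both strings and a run-wise two-pointer merge (alternative decomposition, same result).

-- ===== PORT A =====
-- shared helper: ''.join(sorted("".join(collections.OrderedDict.fromkeys(s)))) — both Pythons contain this very code in their guard branches
def pvSortedUnique (s : List Char) : String :=
  String.ofList (PySem.List.sorted (PySem.List.dedup s) (fun c => c) false)

-- inner loop of A: for j …: if first[i] != second[j]: flag = 1 else: flag = 0; break
def pvInnerA (ch : Char) (flag : Int) : List Char → Int
  | [] => flag
  | c :: cs => if ch ≠ c then pvInnerA ch 1 cs else 0

-- body of A's outer for-loop: state = (flag, c)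
def pvStepA (s : List Char) (st : Int × List Char) (ch : Char) : Int × List Char :=
  let flag := pvInnerA ch st.1 s
  if flag = 1 then (flag, st.2 ++ [ch]) else (flag, st.2)

def get_sorted_diff_string (first : String) (second : String) : String :=
  let xy : String := ""
  if first == second then xy
  else if first.toList.length = 0 ∧ second.toList.length ≠ 0 then
    pvSortedUnique second.toList
  else if first.toList.length ≠ 0 ∧ second.toList.length = 0 then
    pvSortedUnique first.toList
  else
    let st := first.toList.foldl (pvStepA second.toList) (0, [])
    String.ofList (PySem.List.sorted st.2 (fun c => c) false)

-- ===== PORT B =====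
-- the while-loop of Source B: walk the runs of sorted(first), advancing a pointer into sorted(second)
-- (the suffix ss stands for Source B's index j; run/rest' mirror the run_end scan; emit the run iff its char is not at the pointer)
def pvMergeRuns (sf ss : List Char) : List Char :=
  match sf with
  | [] => []
  | ch :: rest =>
    let run := List.takeWhile (fun c => c == ch) (ch :: rest)
    let rest' := List.dropWhile (fun c => c == ch) (ch :: rest)
    let ss' := List.dropWhile (fun c => decide (c < ch)) ss
    if ss'.head? ≠ some ch then run ++ pvMergeRuns rest' ss' else pvMergeRuns rest' ss'
termination_by sf.length
decreasing_by
  all_goals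
    simp only [List.dropWhile_cons, beq_self_eq_true, if_true]
    exact Nat.lt_succ_of_le (List.length_dropWhile_le _ rest)

def get_sorted_diff_string_alt (first : String) (second : String) : String :=
  if first == second then ""
  else if first.toList.length = 0 ∧ second.toList.length ≠ 0 then
    pvSortedUnique second.toList
  else if first.toList.length ≠ 0 ∧ second.toList.length = 0 then
    pvSortedUnique first.toList
  else
    String.ofList (pvMergeRuns (PySem.List.sorted first.toList (fun c => c) false)
                               (PySem.List.sorted second.toList (fun c => c) false))

-- ===== PRECONDITION & SPEC =====
def Spec_get_sorted_diff_string (first : String) (second : String) (out : String) : Prop := out = get_sorted_diff_string_alt first second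
instance (first : String) (second : String) (out : String) : Decidable (Spec_get_sorted_diff_string first second out) := by unfold Spec_get_sorted_diff_string; infer_instance

-- ===== CLAIM (what is proved, stated in full; the proofs are below) =====
def Claim_equal_get_sorted_diff_string : Prop := ∀ (first : String) (second : String), Dom_get_sorted_diff_string first second → Spec_get_sorted_diff_string first second (get_sorted_diff_string first second)

-- ===== LEMMAS AND PROOFS =====

-- A's inner loop with flag already 1 decides membership
lemma pvInnerA_one (ch : Char) : ∀ cs : List Char,
    pvInnerA ch 1 cs = if ch ∈ cs then 0 else 1 := by
  intro cs
  induction cs with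
  | nil => simp [pvInnerA]
  | cons c cs ih => by_cases h : ch = c <;> simp [pvInnerA, h, ih]

-- A's inner loop decides membership (nonempty second)
lemma pvInnerA_cons (cs : List Char) (c ch : Char) (flag : Int) :
    pvInnerA ch flag (c :: cs) = if ch ∈ c :: cs then 0 else 1 := by
  by_cases h : ch = c <;> simp [pvInnerA, h, pvInnerA_one]

-- A's outer loop collects first's chars absent from second
lemma pvFoldA_eq (f : List Char) (c : Char) (cs : List Char) (flag : Int) (acc : List Char) :
    (f.foldl (pvStepA (c :: cs)) (flag, acc)).2
      = acc ++ f.filter (fun ch => decide (ch ∉ c :: cs)) := by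
  induction f generalizing flag acc with
  | nil => simp
  | cons ch f' ih =>
    simp only [List.foldl_cons, List.filter_cons]
    by_cases h : ch ∈ c :: cs
    · simp [pvStepA, pvInnerA_cons, h, ih]
    · simp [pvStepA, pvInnerA_cons, h, ih]

-- filter of a constant-valued run
lemma pvFilter_run (p : Char → Bool) (ch : Char) :
    ∀ l : List Char, (∀ x ∈ l, x = ch) → l.filter p = if p ch then l else [] := by
  intro l hl
  induction l with
  | nil => simp
  | cons a t ih =>
    have ha : a = ch := hl a (by simp)
    have ht := ih (fun x hx => hl x (by simp [hx]))
    by_cases h : p ch <;> simp [ha, h, ht]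

-- the two-pointer merge equals a sorted filter
lemma pvMerge_filter : ∀ n (sf ss : List Char), sf.length ≤ n →
    List.Pairwise (· ≤ ·) sf → List.Pairwise (· ≤ ·) ss →
    pvMergeRuns sf ss = sf.filter (fun x => decide (x ∉ ss)) := by
  intro n
  induction n with
  | zero =>
    intro sf ss hlen _ _
    have : sf = [] := List.length_eq_zero_iff.mp (Nat.le_zero.mp hlen)
    subst this; simp [pvMergeRuns]
  | succ n ih =>
    intro sf ss hlen hsf hss
    match sf, hsf, hlen with
    | [], _, _ => simp [pvMergeRuns]
    | ch :: rest, hsf, hlen =>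
      rw [pvMergeRuns]
      set run := List.takeWhile (fun c => c == ch) (ch :: rest) with hrun
      set rest' := List.dropWhile (fun c => c == ch) (ch :: rest) with hrest'
      set ss' := List.dropWhile (fun c => decide (c < ch)) ss with hss'
      -- structural facts
      have hsplit : run ++ rest' = ch :: rest := List.takeWhile_append_dropWhile
      have hrun_mem : ∀ x ∈ run, x = ch := by
        intro x hx
        have := List.mem_takeWhile_imp hx
        simpa using this
      have hrest'_sub : rest' ⊆ ch :: rest := by
        intro x hx; rw [← hsplit]; exact List.mem_append_right _ hx
      have hrest'_pw : List.Pairwise (· ≤ ·) rest' :=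
        hsf.sublist (List.dropWhile_sublist _)
      have hss'_pw : List.Pairwise (· ≤ ·) ss' :=
        hss.sublist (List.dropWhile_sublist _)
      have hle_of_mem : ∀ x, x ∈ ch :: rest → ch ≤ x := by
        intro x hx
        rcases List.mem_cons.mp hx with h | h
        · exact le_of_eq h.symm
        · exact (List.pairwise_cons.mp hsf).1 x h
      -- every element of rest' is > ch
      have hrest'_gt : ∀ x ∈ rest', ch < x := by
        intro x hx
        rcases hx_eq : rest' with _ | ⟨h0, t0⟩
        · rw [hx_eq] at hx; simp at hx
        · have hh := List.head?_dropWhile_not (fun c => c == ch) (ch :: rest)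
          rw [← hrest', hx_eq] at hh
          simp only [List.head?_cons] at hh
          have hh0ne : h0 ≠ ch := by simpa using hh
          have hh0le : ch ≤ h0 :=
            hle_of_mem h0 (hrest'_sub (by rw [hx_eq]; simp))
          have hh0lt : ch < h0 := lt_of_le_of_ne hh0le (Ne.symm hh0ne)
          rw [hx_eq] at hx
          rcases List.mem_cons.mp hx with h | h
          · exact h ▸ hh0lt
          · have h0x : h0 ≤ x := by
              rw [hx_eq] at hrest'_pw
              exact (List.pairwise_cons.mp hrest'_pw).1 x h
            exact lt_of_lt_of_le hh0lt h0x
      -- membership in ss vs ss' for chars > ch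
      have hmem_ss' : ∀ x, ch < x → (x ∈ ss ↔ x ∈ ss') := by
        intro x hx
        constructor
        · intro hxss
          have hdec : ss = List.takeWhile (fun c => decide (c < ch)) ss ++ ss' :=
            List.takeWhile_append_dropWhile.symm
          rw [hdec] at hxss
          rcases List.mem_append.mp hxss with h | h
          · have := List.mem_takeWhile_imp h
            simp only [decide_eq_true_eq] at this
            exact absurd (lt_trans this hx) (lt_irrefl x)
          · exact h
        · intro hxss'
          exact (List.dropWhile_sublist _).subset hxss'
      -- head of ss' is ch iff ch ∈ ss
      have hhead : (ss'.head? = some ch) ↔ ch ∈ ss := by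
        constructor
        · intro h
          have hch' : ch ∈ ss' := by
            rcases he : ss' with _ | ⟨h0, t0⟩
            · rw [he] at h; simp at h
            · rw [he] at h
              simp only [List.head?_cons, Option.some.injEq] at h
              simp [h]
          exact (List.dropWhile_sublist _).subset hch'
        · intro hch
          have hch' : ch ∈ ss' := by
            have hdec : ss = List.takeWhile (fun c => decide (c < ch)) ss ++ ss' :=
              List.takeWhile_append_dropWhile.symm
            rw [hdec] at hch
            rcases List.mem_append.mp hch with h | h
            · have := List.mem_takeWhile_imp h
              simp at this
            · exact h
          rcases he : ss' with _ | ⟨h0, t0⟩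
          · rw [he] at hch'; simp at hch'
          · have hh := List.head?_dropWhile_not (fun c => decide (c < ch)) ss
            rw [← hss', he] at hh
            simp only [List.head?_cons] at hh
            have hh0ge : ch ≤ h0 := by simpa using hh
            rw [he] at hch'
            rcases List.mem_cons.mp hch' with h | h
            · simp [h]
            · have hle : h0 ≤ ch := by
                rw [he] at hss'_pw
                exact (List.pairwise_cons.mp hss'_pw).1 ch h
              simp [le_antisymm hle hh0ge]
      -- recursive call
      have hlen' : rest'.length ≤ n := by
        have h1 : rest' = List.dropWhile (fun c => c == ch) rest := by
          rw [hrest']; simp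
        have h2 : rest'.length ≤ rest.length := by
          rw [h1]; exact List.length_dropWhile_le _ _
        have h3 : rest.length + 1 ≤ n + 1 := by simpa using hlen
        omega
      have hih := ih rest' ss' hlen' hrest'_pw hss'_pw
      -- filters agree on rest'
      have hfilt : rest'.filter (fun x => decide (x ∉ ss')) = rest'.filter (fun x => decide (x ∉ ss)) := by
        apply List.filter_congr
        intro x hx
        have := hmem_ss' x (hrest'_gt x hx)
        simp [this]
      -- split filter on the whole list
      have hsplitf : (ch :: rest).filter (fun x => decide (x ∉ ss))
          = run.filter (fun x => decide (x ∉ ss)) ++ rest'.filter (fun x => decide (x ∉ ss)) := by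
        rw [← hsplit, List.filter_append]
      by_cases hch : ch ∈ ss
      · have hc : ¬ (ss'.head? ≠ some ch) := by simp [hhead, hch]
        rw [if_neg hc, hih, hfilt, hsplitf]
        rw [pvFilter_run _ ch run hrun_mem]
        simp [hch]
      · have hc : ss'.head? ≠ some ch := by simp [hhead, hch]
        rw [if_pos hc, hih, hfilt, hsplitf]
        rw [pvFilter_run _ ch run hrun_mem]
        simp [hch]

-- sorting then filtering = filtering then sorting (Char, total order, duplicates identical)
lemma pvSorted_filter (f : List Char) (p : Char → Bool) :
    PySem.List.sorted (f.filter p) (fun c => c) false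
      = (PySem.List.sorted f (fun c => c) false).filter p := by
  have hperm : (PySem.List.sorted (f.filter p) (fun c => c) false).Perm
      ((PySem.List.sorted f (fun c => c) false).filter p) :=
    (PySem.List.sorted_perm (f.filter p) (fun c : Char => c) false).trans
      ((PySem.List.sorted_perm f (fun c : Char => c) false).filter p).symm
  exact hperm.eq_of_pairwise (fun a b _ _ hab hba => le_antisymm hab hba)
    (PySem.List.sorted_pairwise (f.filter p) (fun c : Char => c))
    ((PySem.List.sorted_pairwise f (fun c : Char => c)).sublist List.filter_sublist)

-- ===== VERDICT (by name: the statement is the Claim_ definition above) =====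
theorem get_sorted_diff_string_spec : Claim_equal_get_sorted_diff_string := by
  intro first second _
  unfold Spec_get_sorted_diff_string get_sorted_diff_string get_sorted_diff_string_alt
  split_ifs with h1 h2 h3
  · rfl
  · rfl
  · rfl
  · -- general branch: second is nonempty
    have hs_ne : second.toList ≠ [] := by
      intro hnil
      have hslen : second.toList.length = 0 := by simp [hnil]
      have hf : first.toList.length = 0 := by
        by_contra hf
        exact h3 ⟨hf, hslen⟩
      have hfeq : first.toList = second.toList := by
        rw [List.length_eq_zero_iff.mp hf, hnil]
      have : first = second := String.toList_inj.mp hfeq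
      simp [this] at h1
    rcases he : second.toList with _ | ⟨c, cs⟩
    · exact absurd he hs_ne
    · apply congrArg String.ofList
      rw [pvFoldA_eq, List.nil_append, pvSorted_filter]
      rw [pvMerge_filter (PySem.List.sorted first.toList (fun c => c) false).length _ _ le_rfl
          (PySem.List.sorted_pairwise _ _) (PySem.List.sorted_pairwise _ _)]
      apply List.filter_congr
      intro x hx
      have hms : x ∈ PySem.List.sorted (c :: cs) (fun c => c) false ↔ x ∈ (c :: cs) :=
        PySem.List.mem_sorted _ _ _ _
      simp [hms]
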